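-- pv_equiv track=rewrite | github.com/mroraie/textdiff | textdiff/comparator/views.py | _convert_to_phonetic
-- ===== SOURCE A (Python) =====
-- def _convert_to_phonetic(text):
--     """تبدیل متن به نمایش آوایی (فونتیک)"""
--     # اینجا باید الگوریتم تبدیل به فونتیک را پیاده‌سازی کنید
--     # این یک پیاده‌سازی ساده است که باید با الگوریتم واقعی جایگزین شود
--     phonetic_map = {
--         'c': 'k', 'q': 'k', 'x': 'ks',
--         'ph': 'f', 'gh': 'g', 'rh': 'r',
--         # می‌توانید نقشه کاملتری ایجاد کنید
--     }
--
--     result = text.lower()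
--     for key, value in phonetic_map.items():
--         result = result.replace(key, value)
--
--     return result
-- ===== SOURCE B (Python) =====
-- def _convert_to_phonetic(text):
--     """تبدیل متن به نمایش آوایی (فونتیک)"""
--     two_char = {'ph': 'f', 'gh': 'g', 'rh': 'r'}
--     one_char = {'c': 'k', 'q': 'k', 'x': 'ks'}
--     s = text.lower()
--     out = []
--     i = 0
--     n = len(s)
--     while i < n:
--         pair = s[i:i + 2]
--         if pair in two_char:
--             out.append(two_char[pair])
--             i += 2
--         elif s[i] in one_char:
--             out.append(one_char[s[i]])
--             i += 1
--         else:
--             out.append(s[i])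
--             i += 1
--     return ''.join(out)
-- ===== Notes on version B (the rewrite author's own statement) =====
-- stated objective: alternative
-- what changed: Replaces the six sequential full-string str.replace passes by a single left-to-right scan that matches the two-char keys (ph/gh/rh) then the one-char keys (c/q/x) at each position and builds the output once; asymptotically one pass instead of six, though CPython's C-level replace makes A fast in practice.
import Mathlib
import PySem

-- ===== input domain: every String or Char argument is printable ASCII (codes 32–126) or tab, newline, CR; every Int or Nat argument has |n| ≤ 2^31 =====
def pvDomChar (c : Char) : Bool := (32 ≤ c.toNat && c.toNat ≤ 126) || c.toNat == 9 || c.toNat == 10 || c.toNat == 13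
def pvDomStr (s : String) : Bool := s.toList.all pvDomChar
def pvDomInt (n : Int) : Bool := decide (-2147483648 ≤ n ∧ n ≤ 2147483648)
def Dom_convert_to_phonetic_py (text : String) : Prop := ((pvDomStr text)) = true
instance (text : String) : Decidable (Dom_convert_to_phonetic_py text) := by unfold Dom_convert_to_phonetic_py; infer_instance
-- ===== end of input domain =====

-- B replaces A's six sequential str.replace passes by one left-to-right scan over the
-- lowered text (two-char keys first, then one-char keys); alternative decomposition, same result.


-- ===== PORT A =====
-- phonetic_map as an association list in insertion order; the dict loop is a foldl of str.replace.
def convert_to_phonetic_py (text : String) : String :=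
  let phonetic_map : List (String × String) :=
    [("c", "k"), ("q", "k"), ("x", "ks"), ("ph", "f"), ("gh", "g"), ("rh", "r")]
  let result := PySem.Str.lower text
  phonetic_map.foldl (fun r kv => PySem.Str.replace r kv.1 kv.2) result

-- ===== PORT B =====
-- single left-to-right scan: the two-char keys (ph/gh/rh) are tried first, then the one-char keys (c/q/x)
def pvScanB : List Char → List Char
  | 'p' :: 'h' :: t => 'f' :: pvScanB t
  | 'g' :: 'h' :: t => 'g' :: pvScanB t
  | 'r' :: 'h' :: t => 'r' :: pvScanB t
  | 'c' :: t => 'k' :: pvScanB t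
  | 'q' :: t => 'k' :: pvScanB t
  | 'x' :: t => 'k' :: 's' :: pvScanB t
  | c :: t => c :: pvScanB t
  | [] => []

def convert_to_phonetic_py_alt (text : String) : String :=
  String.ofList (pvScanB (PySem.Str.lower text).toList)

-- ===== PRECONDITION & SPEC =====
def Spec_convert_to_phonetic_py (text : String) (out : String) : Prop := out = convert_to_phonetic_py_alt text
instance (text : String) (out : String) : Decidable (Spec_convert_to_phonetic_py text out) := by unfold Spec_convert_to_phonetic_py; infer_instance

-- ===== CLAIM (what is proved, stated in full; the proofs are below) =====
def Claim_equal_convert_to_phonetic_py : Prop := ∀ (text : String), Dom_convert_to_phonetic_py text → Spec_convert_to_phonetic_py text (convert_to_phonetic_py text)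

-- ===== LEMMAS AND PROOFS =====

-- functional form of one single-char replace pass
def pvRep1 (a : Char) (r : List Char) : List Char → List Char
  | [] => []
  | c :: t => (if c = a then r else [c]) ++ pvRep1 a r t

-- functional form of one two-char replace pass (left-to-right, non-overlapping)
def pvRep2 (a b : Char) (r : List Char) : List Char → List Char
  | x :: y :: t => if x = a ∧ y = b then r ++ pvRep2 a b r t else x :: pvRep2 a b r (y :: t)
  | l => l

theorem pvGo_rep1 (a : Char) (r : List Char) :
    ∀ (fuel : Nat) (l acc : List Char), l.length ≤ fuel →
      PySem.Chars.replace.go [a] r fuel l acc = acc.reverse ++ pvRep1 a r l := by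
  intro fuel
  induction fuel with
  | zero =>
    intro l acc h
    have : l = [] := by cases l <;> simp_all
    subst this
    simp [PySem.Chars.replace.go, pvRep1]
  | succ n ih =>
    intro l acc h
    cases l with
    | nil => simp [PySem.Chars.replace.go, pvRep1]
    | cons c t =>
      by_cases hc : c = a
      · subst hc
        have hpre : List.isPrefixOf [c] (c :: t) = true := by simp [List.isPrefixOf]
        rw [PySem.Chars.replace.go]
        simp only [hpre, if_true]
        rw [ih _ _ (by simpa using Nat.le_of_succ_le_succ h)]
        simp [pvRep1]
      · have hpre : List.isPrefixOf [a] (c :: t) = false := by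
          simp only [List.isPrefixOf, List.isPrefixOf_nil_left, Bool.and_true, beq_iff_eq]
          exact decide_eq_false (fun h' => hc h'.symm)
        rw [PySem.Chars.replace.go]
        simp only [hpre, Bool.false_eq_true, if_false]
        rw [ih _ _ (by simpa using Nat.le_of_succ_le_succ h)]
        simp [pvRep1, hc]

theorem pvGo_rep2 (a b : Char) (r : List Char) :
    ∀ (fuel : Nat) (l acc : List Char), l.length ≤ fuel →
      PySem.Chars.replace.go [a, b] r fuel l acc = acc.reverse ++ pvRep2 a b r l := by
  intro fuel
  induction fuel with
  | zero =>
    intro l acc h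
    have : l = [] := by cases l <;> simp_all
    subst this
    simp [PySem.Chars.replace.go, pvRep2]
  | succ n ih =>
    intro l acc h
    cases l with
    | nil => simp [PySem.Chars.replace.go, pvRep2]
    | cons c t =>
      by_cases hpre : List.isPrefixOf [a, b] (c :: t) = true
      · obtain ⟨hc, t', ht⟩ : c = a ∧ ∃ t', t = b :: t' := by
          cases t with
          | nil => simp [List.isPrefixOf] at hpre
          | cons d t' =>
            simp [List.isPrefixOf] at hpre
            exact ⟨hpre.1.symm, t', by rw [hpre.2]⟩
        subst hc; subst ht
        rw [PySem.Chars.replace.go]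
        simp only [hpre, if_true]
        rw [ih _ _ (by simp at h ⊢; omega)]
        simp [pvRep2]
      · rw [PySem.Chars.replace.go]
        simp only [eq_false_of_ne_true hpre, Bool.false_eq_true, if_false]
        rw [ih _ _ (by simpa using Nat.le_of_succ_le_succ h)]
        have hne : ¬ (c = a ∧ t.head? = some b) := by
          intro ⟨h1, h2⟩
          apply hpre
          cases t with
          | nil => simp at h2
          | cons d t' => simp_all [List.isPrefixOf]
        cases t with
        | nil => simp [pvRep2]
        | cons d t' =>
          by_cases hca : c = a
          · have hdb : d ≠ b := fun hdb => hne ⟨hca, by simp [hdb]⟩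
            simp [pvRep2, hca, hdb]
          · simp [pvRep2, hca]

theorem pvReplace_rep1 (a : Char) (r l : List Char) :
    PySem.Chars.replace l [a] r = pvRep1 a r l := by
  rw [PySem.Chars.replace]
  simpa using pvGo_rep1 a r l.length l [] (le_refl _)

theorem pvReplace_rep2 (a b : Char) (r l : List Char) :
    PySem.Chars.replace l [a, b] r = pvRep2 a b r l := by
  rw [PySem.Chars.replace]
  simpa using pvGo_rep2 a b r l.length l [] (le_refl _)

-- pushing lemmas
theorem pvRep2_cons_ne (a b : Char) (r : List Char) (c : Char) (l : List Char) (h : c ≠ a) :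
    pvRep2 a b r (c :: l) = c :: pvRep2 a b r l := by
  cases l with
  | nil => simp [pvRep2]
  | cons y t => simp [pvRep2, fun hc => h hc]

theorem pvRep2_cons₂ (a b : Char) (r : List Char) (c d : Char) (l : List Char)
    (h : ¬ (c = a ∧ d = b)) :
    pvRep2 a b r (c :: d :: l) = c :: pvRep2 a b r (d :: l) := by
  simp [pvRep2, h]

theorem pvRep2_match (a b : Char) (r l : List Char) :
    pvRep2 a b r (a :: b :: l) = r ++ pvRep2 a b r l := by
  simp [pvRep2]

-- head of rep2 output is never 'h' when input head and replacement head are not 'h'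
theorem pvRep2_head_ne (a b : Char) (r : List Char) (l : List Char)
    (hr : r.head? ≠ some 'h') (hrne : r ≠ []) (hl : l.head? ≠ some 'h') :
    (pvRep2 a b r l).head? ≠ some 'h' := by
  cases l with
  | nil => simp [pvRep2]
  | cons x t =>
    cases t with
    | nil => simpa [pvRep2] using hl
    | cons y u =>
      by_cases hm : x = a ∧ y = b
      · rw [hm.1, hm.2, pvRep2_match]
        cases r with
        | nil => exact absurd rfl hrne
        | cons rc rt => simpa using hr
      · rw [pvRep2_cons₂ _ _ _ _ _ _ hm]
        simpa using hl

theorem pvRep2_cons_safe (a b : Char) (r : List Char) (c : Char) (l : List Char)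
    (h : l.head? ≠ some b) :
    pvRep2 a b r (c :: l) = c :: pvRep2 a b r l := by
  cases l with
  | nil => simp [pvRep2]
  | cons y t =>
    have : ¬ (c = a ∧ y = b) := fun hm => h (by simp [hm.2])
    exact pvRep2_cons₂ _ _ _ _ _ _ this

theorem pvRep1_append (a : Char) (r : List Char) (u v : List Char) :
    pvRep1 a r (u ++ v) = pvRep1 a r u ++ pvRep1 a r v := by
  induction u with
  | nil => simp [pvRep1]
  | cons c t ih => simp [pvRep1, ih]

def pvA1 (s : List Char) : List Char :=
  pvRep1 'x' ['k', 's'] (pvRep1 'q' ['k'] (pvRep1 'c' ['k'] s))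

def pvTau (c : Char) : List Char :=
  if c = 'c' then ['k'] else if c = 'q' then ['k'] else if c = 'x' then ['k', 's'] else [c]

theorem pvA1_cons (c : Char) (t : List Char) : pvA1 (c :: t) = pvTau c ++ pvA1 t := by
  unfold pvA1 pvTau
  by_cases hc : c = 'c'
  · subst hc; simp [pvRep1, pvRep1_append]
  · by_cases hq : c = 'q'
    · subst hq; simp [pvRep1, pvRep1_append]
    · by_cases hx : c = 'x'
      · subst hx; simp [pvRep1, pvRep1_append]
      · simp [pvRep1, pvRep1_append, hc, hq, hx]

theorem pvA1_head (t : List Char) (h : t.head? ≠ some 'h') : (pvA1 t).head? ≠ some 'h' := by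
  cases t with
  | nil => simp [pvA1, pvRep1]
  | cons c u =>
    rw [pvA1_cons]
    unfold pvTau
    by_cases hc : c = 'c'
    · simp [hc]
    · by_cases hq : c = 'q'
      · simp [hq, hc]
      · by_cases hx : c = 'x'
        · simp [hx, hc, hq]
        · simp only [hc, hq, hx, if_false]
          simpa using h

theorem pvScanB_generic (c : Char) (t : List Char)
    (hc : c ≠ 'c') (hq : c ≠ 'q') (hx : c ≠ 'x')
    (hp : ¬ (c = 'p' ∧ t.head? = some 'h'))
    (hg : ¬ (c = 'g' ∧ t.head? = some 'h'))
    (hr : ¬ (c = 'r' ∧ t.head? = some 'h')) :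
    pvScanB (c :: t) = c :: pvScanB t := by
  rw [pvScanB.eq_def]
  split
  all_goals simp_all

def pvChain (s : List Char) : List Char :=
  pvRep2 'r' 'h' ['r'] (pvRep2 'g' 'h' ['g'] (pvRep2 'p' 'h' ['f'] (pvA1 s)))

theorem pvMainAux : ∀ (n : Nat) (s : List Char), s.length ≤ n → pvChain s = pvScanB s := by
  intro n
  induction n with
  | zero =>
    intro s h
    have : s = [] := by cases s <;> simp_all
    subst this
    simp [pvChain, pvA1, pvRep1, pvRep2, pvScanB]
  | succ n ih =>
    intro s h
    cases s with
    | nil => simp [pvChain, pvA1, pvRep1, pvRep2, pvScanB]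
    | cons c t =>
      by_cases hph : c = 'p' ∧ t.head? = some 'h'
      · obtain ⟨hc, hh⟩ := hph
        subst hc
        cases t with
        | nil => simp at hh
        | cons d t' =>
          have hd : d = 'h' := by simpa using hh
          subst hd
          unfold pvChain
          rw [pvA1_cons, pvA1_cons]
          rw [show pvTau 'p' = ['p'] from by decide, show pvTau 'h' = ['h'] from by decide]
          simp only [List.cons_append, List.nil_append]
          rw [pvRep2_match]
          simp only [List.singleton_append]
          rw [pvRep2_cons_ne 'g' 'h' ['g'] 'f' _ (by decide), pvRep2_cons_ne 'r' 'h' ['r'] 'f' _ (by decide)]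
          have := ih t' (by simp at h ⊢; omega)
          rw [show pvScanB ('p' :: 'h' :: t') = 'f' :: pvScanB t' from by simp [pvScanB]]
          rw [← this]
          rfl
      · by_cases hgh : c = 'g' ∧ t.head? = some 'h'
        · obtain ⟨hc, hh⟩ := hgh
          subst hc
          cases t with
          | nil => simp at hh
          | cons d t' =>
            have hd : d = 'h' := by simpa using hh
            subst hd
            unfold pvChain
            rw [pvA1_cons, pvA1_cons]
            rw [show pvTau 'g' = ['g'] from by decide, show pvTau 'h' = ['h'] from by decide]
            simp only [List.cons_append, List.nil_append]
            rw [pvRep2_cons₂ 'p' 'h' ['f'] 'g' 'h' _ (by decide),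
                pvRep2_cons_ne 'p' 'h' ['f'] 'h' _ (by decide)]
            rw [pvRep2_match]
            simp only [List.singleton_append]
            rw [pvRep2_cons_ne 'r' 'h' ['r'] 'g' _ (by decide)]
            have := ih t' (by simp at h ⊢; omega)
            rw [show pvScanB ('g' :: 'h' :: t') = 'g' :: pvScanB t' from by simp [pvScanB]]
            rw [← this]
            rfl
        · by_cases hrh : c = 'r' ∧ t.head? = some 'h'
          · obtain ⟨hc, hh⟩ := hrh
            subst hc
            cases t with
            | nil => simp at hh
            | cons d t' =>
              have hd : d = 'h' := by simpa using hh
              subst hd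
              unfold pvChain
              rw [pvA1_cons, pvA1_cons]
              rw [show pvTau 'r' = ['r'] from by decide, show pvTau 'h' = ['h'] from by decide]
              simp only [List.cons_append, List.nil_append]
              rw [pvRep2_cons₂ 'p' 'h' ['f'] 'r' 'h' _ (by decide),
                  pvRep2_cons_ne 'p' 'h' ['f'] 'h' _ (by decide)]
              rw [pvRep2_cons₂ 'g' 'h' ['g'] 'r' 'h' _ (by decide),
                  pvRep2_cons_ne 'g' 'h' ['g'] 'h' _ (by decide)]
              rw [pvRep2_match]
              simp only [List.singleton_append]
              have := ih t' (by simp at h ⊢; omega)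
              rw [show pvScanB ('r' :: 'h' :: t') = 'r' :: pvScanB t' from by simp [pvScanB]]
              rw [← this]
              rfl
          · -- no two-char key matches at the head
            have hih := ih t (by simp at h ⊢; omega)
            by_cases hc : c = 'c'
            · subst hc
              unfold pvChain
              rw [pvA1_cons, show pvTau 'c' = ['k'] from by decide]
              simp only [List.singleton_append]
              rw [pvRep2_cons_ne 'p' 'h' ['f'] 'k' _ (by decide),
                  pvRep2_cons_ne 'g' 'h' ['g'] 'k' _ (by decide),
                  pvRep2_cons_ne 'r' 'h' ['r'] 'k' _ (by decide)]
              rw [show pvScanB ('c' :: t) = 'k' :: pvScanB t from by simp [pvScanB]]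
              rw [← hih]
              rfl
            · by_cases hq : c = 'q'
              · subst hq
                unfold pvChain
                rw [pvA1_cons, show pvTau 'q' = ['k'] from by decide]
                simp only [List.singleton_append]
                rw [pvRep2_cons_ne 'p' 'h' ['f'] 'k' _ (by decide),
                    pvRep2_cons_ne 'g' 'h' ['g'] 'k' _ (by decide),
                    pvRep2_cons_ne 'r' 'h' ['r'] 'k' _ (by decide)]
                rw [show pvScanB ('q' :: t) = 'k' :: pvScanB t from by simp [pvScanB]]
                rw [← hih]
                rfl
              · by_cases hx : c = 'x'
                · subst hx
                  unfold pvChain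
                  rw [pvA1_cons, show pvTau 'x' = ['k', 's'] from by decide]
                  simp only [List.cons_append, List.nil_append]
                  rw [pvRep2_cons_ne 'p' 'h' ['f'] 'k' _ (by decide),
                      pvRep2_cons_ne 'p' 'h' ['f'] 's' _ (by decide),
                      pvRep2_cons_ne 'g' 'h' ['g'] 'k' _ (by decide),
                      pvRep2_cons_ne 'g' 'h' ['g'] 's' _ (by decide),
                      pvRep2_cons_ne 'r' 'h' ['r'] 'k' _ (by decide),
                      pvRep2_cons_ne 'r' 'h' ['r'] 's' _ (by decide)]
                  rw [show pvScanB ('x' :: t) = 'k' :: 's' :: pvScanB t from by simp [pvScanB]]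
                  rw [← hih]
                  rfl
                · -- generic character: passes straight through every pass
                  have hA1h : (c = 'p' ∨ c = 'g' ∨ c = 'r') → (pvA1 t).head? ≠ some 'h' := by
                    intro hcase
                    apply pvA1_head
                    intro hth
                    rcases hcase with h' | h' | h'
                    · exact hph ⟨h', hth⟩
                    · exact hgh ⟨h', hth⟩
                    · exact hrh ⟨h', hth⟩
                  unfold pvChain
                  rw [pvA1_cons, show pvTau c = [c] from by simp [pvTau, hc, hq, hx]]
                  simp only [List.singleton_append]
                  have eP : pvRep2 'p' 'h' ['f'] (c :: pvA1 t) = c :: pvRep2 'p' 'h' ['f'] (pvA1 t) := by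
                    by_cases hcp : c = 'p'
                    · exact pvRep2_cons_safe _ _ _ _ _ (hA1h (Or.inl hcp))
                    · exact pvRep2_cons_ne _ _ _ _ _ hcp
                  rw [eP]
                  have eG : pvRep2 'g' 'h' ['g'] (c :: pvRep2 'p' 'h' ['f'] (pvA1 t))
                      = c :: pvRep2 'g' 'h' ['g'] (pvRep2 'p' 'h' ['f'] (pvA1 t)) := by
                    by_cases hcg : c = 'g'
                    · exact pvRep2_cons_safe _ _ _ _ _
                        (pvRep2_head_ne _ _ _ _ (by decide) (by decide) (hA1h (Or.inr (Or.inl hcg))))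
                    · exact pvRep2_cons_ne _ _ _ _ _ hcg
                  rw [eG]
                  have eR : pvRep2 'r' 'h' ['r'] (c :: pvRep2 'g' 'h' ['g'] (pvRep2 'p' 'h' ['f'] (pvA1 t)))
                      = c :: pvRep2 'r' 'h' ['r'] (pvRep2 'g' 'h' ['g'] (pvRep2 'p' 'h' ['f'] (pvA1 t))) := by
                    by_cases hcr : c = 'r'
                    · exact pvRep2_cons_safe _ _ _ _ _
                        (pvRep2_head_ne _ _ _ _ (by decide) (by decide)
                          (pvRep2_head_ne _ _ _ _ (by decide) (by decide) (hA1h (Or.inr (Or.inr hcr)))))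
                    · exact pvRep2_cons_ne _ _ _ _ _ hcr
                  rw [eR]
                  rw [pvScanB_generic c t hc hq hx hph hgh hrh]
                  rw [← hih]
                  rfl

-- ===== VERDICT (by name: the statement is the Claim_ definition above) =====
theorem convert_to_phonetic_py_spec : Claim_equal_convert_to_phonetic_py := by
  intro text _
  unfold Spec_convert_to_phonetic_py
  unfold convert_to_phonetic_py convert_to_phonetic_py_alt
  simp only [List.foldl_cons, List.foldl_nil]
  apply String.toList_injective
  simp only [PySem.Str.toList_replace, String.toList_ofList]
  rw [show ("c" : String).toList = ['c'] from rfl, show ("q" : String).toList = ['q'] from rfl,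
      show ("x" : String).toList = ['x'] from rfl, show ("ph" : String).toList = ['p', 'h'] from rfl,
      show ("gh" : String).toList = ['g', 'h'] from rfl, show ("rh" : String).toList = ['r', 'h'] from rfl,
      show ("k" : String).toList = ['k'] from rfl, show ("ks" : String).toList = ['k', 's'] from rfl,
      show ("f" : String).toList = ['f'] from rfl, show ("g" : String).toList = ['g'] from rfl,
      show ("r" : String).toList = ['r'] from rfl]
  rw [pvReplace_rep1, pvReplace_rep1, pvReplace_rep1, pvReplace_rep2, pvReplace_rep2, pvReplace_rep2]
  exact pvMainAux _ _ (le_refl _)
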